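-- pv_equiv track=rewrite | github.com/rteehas/action_abstraction | scripts/principle_conditioned_problem_solving.py | choose_principle_field
-- ===== SOURCE A (Python) =====
-- from typing import Any
--
-- DEFAULT_PRINCIPLE_FIELDS = ("generated_principles_text", "principles", "abstraction")
--
-- def choose_principle_field(rows: list[dict[str, Any]], requested_field: str) -> str:
--     if requested_field:
--         return requested_field
--     for field in DEFAULT_PRINCIPLE_FIELDS:
--         if any((example.get(field) or "").strip() for example in rows):
--             return field
--     raise ValueError(
--         "No non-empty principle field found. Tried: " + ", ".join(DEFAULT_PRINCIPLE_FIELDS)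
--     )
-- ===== SOURCE B (Python) =====
-- DEFAULT_PRINCIPLE_FIELDS = ("generated_principles_text", "principles", "abstraction")
--
-- def choose_principle_field(rows, requested_field):
--     if requested_field:
--         return requested_field
--     # one row-major pass: collect which default fields have a non-empty value anywhere
--     present = set()
--     for row in rows:
--         for field in DEFAULT_PRINCIPLE_FIELDS:
--             if (row.get(field) or "").strip():
--                 present.add(field)
--     # priority-ordered pick
--     for field in DEFAULT_PRINCIPLE_FIELDS:
--         if field in present:
--             return field
--     raise ValueError(
--         "No non-empty principle field found. Tried: " + ", ".join(DEFAULT_PRINCIPLE_FIELDS)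
--     )
-- ===== Notes on version B (the rewrite author's own statement) =====
-- stated objective: alternative
-- what changed: Field-major short-circuit scan (any() over rows per field) replaced by a single row-major pass building a set of fields that are non-empty somewhere, followed by a priority-ordered pick from the fixed field tuple.
import Mathlib
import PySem

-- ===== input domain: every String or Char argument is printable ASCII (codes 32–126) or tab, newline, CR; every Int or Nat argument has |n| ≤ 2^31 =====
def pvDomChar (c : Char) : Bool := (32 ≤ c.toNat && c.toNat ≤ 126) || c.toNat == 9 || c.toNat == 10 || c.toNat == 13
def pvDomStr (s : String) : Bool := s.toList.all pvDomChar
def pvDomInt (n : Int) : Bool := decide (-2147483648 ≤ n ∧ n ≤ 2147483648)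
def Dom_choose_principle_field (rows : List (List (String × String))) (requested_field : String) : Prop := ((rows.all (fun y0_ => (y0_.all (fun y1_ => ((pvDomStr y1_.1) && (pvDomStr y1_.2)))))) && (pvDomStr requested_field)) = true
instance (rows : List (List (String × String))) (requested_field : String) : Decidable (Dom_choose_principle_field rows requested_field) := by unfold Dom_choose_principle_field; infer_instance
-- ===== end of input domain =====

-- ===== PORT A =====
-- B changes the traversal (one row-major set-building pass instead of field-major any() scans); equal value proved on Pre_ (where A returns).
-- shared elementary test: bool((row.get(field) or "").strip())
def pvNonEmptyAt (row : List (String × String)) (field : String) : Bool :=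
  decide (PySem.Str.strip (((PySem.Dict.mk row).get? field).getD "") ≠ "")

-- A: for each field in the fixed tuple, any() over rows; the ValueError path is outside Pre_ ("" stands for the raise)
def choose_principle_field (rows : List (List (String × String))) (requested_field : String) : String :=
  if requested_field ≠ "" then requested_field
  else if rows.any (fun ex => pvNonEmptyAt ex "generated_principles_text") then "generated_principles_text"
  else if rows.any (fun ex => pvNonEmptyAt ex "principles") then "principles"
  else if rows.any (fun ex => pvNonEmptyAt ex "abstraction") then "abstraction"
  else ""

-- ===== PORT B =====
def pvFieldsB : List String := ["generated_principles_text", "principles", "abstraction"]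

-- one row-major pass collecting the fields that are non-empty somewhere
def pvPresent (rows : List (List (String × String))) : PySem.Set String :=
  rows.foldl (fun s row =>
    pvFieldsB.foldl (fun s field => if pvNonEmptyAt row field then PySem.Set.add s field else s) s)
    PySem.Set.empty

def choose_principle_field_alt (rows : List (List (String × String))) (requested_field : String) : String :=
  if requested_field ≠ "" then requested_field
  else match pvFieldsB.find? (fun field => PySem.Set.contains (pvPresent rows) field) with
    | some field => field
    | none => ""   -- the ValueError path, outside Pre_

-- ===== PRECONDITION & SPEC =====
-- Pre_ excludes exactly the inputs where A raises ValueError: empty requested_field and no default field non-empty in any row.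
def Pre_choose_principle_field (rows : List (List (String × String))) (requested_field : String) : Prop :=
  requested_field ≠ "" ∨
    ∃ field ∈ (["generated_principles_text", "principles", "abstraction"] : List String),
      ∃ row ∈ rows, PySem.Str.strip (((PySem.Dict.mk row).get? field).getD "") ≠ ""
instance (rows : List (List (String × String))) (requested_field : String) : Decidable (Pre_choose_principle_field rows requested_field) := by unfold Pre_choose_principle_field; infer_instance
def pvWitness_choose_principle_field : (List (List (String × String))) × String := ([[("principles", "p")]], "")
def Spec_choose_principle_field (rows : List (List (String × String))) (requested_field : String) (out : String) : Prop := out = choose_principle_field_alt rows requested_field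
instance (rows : List (List (String × String))) (requested_field : String) (out : String) : Decidable (Spec_choose_principle_field rows requested_field out) := by unfold Spec_choose_principle_field; infer_instance

-- ===== CLAIM (what is proved, stated in full; the proofs are below) =====
def Claim_equal_choose_principle_field : Prop := ∀ (rows : List (List (String × String))) (requested_field : String), Dom_choose_principle_field rows requested_field → Pre_choose_principle_field rows requested_field → Spec_choose_principle_field rows requested_field (choose_principle_field rows requested_field)

-- ===== LEMMAS AND PROOFS =====
-- one row of B's pass: which fields the inner fold adds to the set
theorem mem_inner_fold (fs : List String) (row : List (String × String)) (s : PySem.Set String) (f : String) :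
    f ∈ fs.foldl (fun s g => if pvNonEmptyAt row g then PySem.Set.add s g else s) s ↔
    f ∈ s ∨ (f ∈ fs ∧ pvNonEmptyAt row f = true) := by
  induction fs generalizing s with
  | nil => simp
  | cons g gs ih =>
    simp only [List.foldl_cons, List.mem_cons]
    by_cases hf : f = g
    · subst hf
      by_cases hg : pvNonEmptyAt row f = true <;>
        simp [hg, ih, PySem.Set.mem_add]
    · by_cases hg : pvNonEmptyAt row g = true <;>
        simp [hg, ih, PySem.Set.mem_add, hf]

-- membership in B's set = the field is a default field with a non-empty value in some row
theorem mem_pvPresent (rows : List (List (String × String))) (f : String) :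
    f ∈ pvPresent rows ↔ f ∈ pvFieldsB ∧ ∃ r ∈ rows, pvNonEmptyAt r f = true := by
  have h : ∀ (rs : List (List (String × String))) (s : PySem.Set String),
      f ∈ rs.foldl (fun s row =>
        pvFieldsB.foldl (fun s field => if pvNonEmptyAt row field then PySem.Set.add s field else s) s) s ↔
      f ∈ s ∨ (f ∈ pvFieldsB ∧ ∃ r ∈ rs, pvNonEmptyAt r f = true) := by
    intro rs
    induction rs with
    | nil => simp
    | cons r rs ih =>
      intro s
      rw [List.foldl_cons, ih, mem_inner_fold]
      constructor
      · rintro ((hs | ⟨hf, hc⟩) | ⟨hf, r', hr', hc⟩)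
        · exact Or.inl hs
        · exact Or.inr ⟨hf, r, List.mem_cons_self .., hc⟩
        · exact Or.inr ⟨hf, r', List.mem_cons_of_mem _ hr', hc⟩
      · rintro (hs | ⟨hf, r', hr', hc⟩)
        · exact Or.inl (Or.inl hs)
        · rcases List.mem_cons.mp hr' with rfl | hr'
          · exact Or.inl (Or.inr ⟨hf, hc⟩)
          · exact Or.inr ⟨hf, r', hr', hc⟩
  simpa [pvPresent, PySem.Set.empty] using h rows PySem.Set.empty

-- contains on B's set, as the any() A computes, for default fields
theorem contains_pvPresent (rows : List (List (String × String))) (f : String) (hf : f ∈ pvFieldsB) :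
    PySem.Set.contains (pvPresent rows) f = rows.any (fun r => pvNonEmptyAt r f) := by
  by_cases h : rows.any (fun r => pvNonEmptyAt r f) = true
  · rw [h]
    exact (PySem.Set.contains_iff _ _).mpr ((mem_pvPresent rows f).mpr ⟨hf, List.any_eq_true.mp h⟩)
  · have hm : f ∉ pvPresent rows := fun hm =>
      h (List.any_eq_true.mpr ((mem_pvPresent rows f).mp hm).2)
    have hc : PySem.Set.contains (pvPresent rows) f ≠ true := fun hc =>
      hm ((PySem.Set.contains_iff _ _).mp hc)
    simp only [ne_eq, Bool.not_eq_true] at hc h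
    rw [hc, h]

theorem choose_principle_field_spec : Claim_equal_choose_principle_field := by
  intro rows requested_field _ hpre
  unfold Spec_choose_principle_field choose_principle_field choose_principle_field_alt
  by_cases hq : requested_field = ""
  · subst hq
    have e1 := contains_pvPresent rows "generated_principles_text" (by simp [pvFieldsB])
    have e2 := contains_pvPresent rows "principles" (by simp [pvFieldsB])
    have e3 := contains_pvPresent rows "abstraction" (by simp [pvFieldsB])
    simp only [ne_eq, not_true_eq_false, if_false, pvFieldsB, List.find?_cons, e1, e2, e3]
    by_cases h1 : rows.any (fun r => pvNonEmptyAt r "generated_principles_text") = true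
    · simp [h1]
    · by_cases h2 : rows.any (fun r => pvNonEmptyAt r "principles") = true
      · simp [h1, h2]
      · by_cases h3 : rows.any (fun r => pvNonEmptyAt r "abstraction") = true
        · simp [h1, h2, h3]
        · exfalso
          rcases hpre with hq' | ⟨f, hf, r, hr, hne⟩
          · exact hq' rfl
          · have hany : rows.any (fun r' => pvNonEmptyAt r' f) = true :=
              List.any_eq_true.mpr ⟨r, hr, by simpa [pvNonEmptyAt] using hne⟩
            simp only [List.mem_cons, List.not_mem_nil, or_false] at hf
            rcases hf with rfl | rfl | rfl
            · exact h1 hany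
            · exact h2 hany
            · exact h3 hany
  · simp [hq]
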